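-- pv_equiv track=rewrite | github.com/gabemdo/odd-p-inv | algebra.py | min_loc
-- ===== SOURCE A (Python) =====
-- def abs(x):
--     if x >= 0:
--         return x
--     return -x
--
-- def min_loc(A,pivot):
--     n = len(A)
--     m = len(A[0])
--     loc = [pivot,pivot]
--     min = float('inf')
--     for row in range(pivot,n):
--         for col in range(pivot,m):
--             if A[row][col] != 0 and (abs(A[row][col]) <= min):
--                 loc = [row,col]
--                 min = abs(A[row][col])
--     return loc
-- ===== SOURCE B (Python) =====
-- def abs(x):
--     if x >= 0:
--         return x
--     return -x
--
-- def min_loc(A, pivot):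
--     n = len(A)
--     m = len(A[0])
--     vals = [abs(A[r][c]) for r in range(pivot, n) for c in range(pivot, m) if A[r][c] != 0]
--     if not vals:
--         return [pivot, pivot]
--     mn = min(vals)
--     loc = [pivot, pivot]
--     for r in range(pivot, n):
--         for c in range(pivot, m):
--             if A[r][c] != 0 and abs(A[r][c]) == mn:
--                 loc = [r, c]
--     return loc
-- ===== Notes on version B (the rewrite author's own statement) =====
-- stated objective: simpler
-- what changed: A's single pass threading a (location, running-min) pair with a float('inf') sentinel is replaced by two independent plain passes: one computing the minimum absolute value of the nonzero submatrix entries, one recording the last position attaining it.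
import Mathlib
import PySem

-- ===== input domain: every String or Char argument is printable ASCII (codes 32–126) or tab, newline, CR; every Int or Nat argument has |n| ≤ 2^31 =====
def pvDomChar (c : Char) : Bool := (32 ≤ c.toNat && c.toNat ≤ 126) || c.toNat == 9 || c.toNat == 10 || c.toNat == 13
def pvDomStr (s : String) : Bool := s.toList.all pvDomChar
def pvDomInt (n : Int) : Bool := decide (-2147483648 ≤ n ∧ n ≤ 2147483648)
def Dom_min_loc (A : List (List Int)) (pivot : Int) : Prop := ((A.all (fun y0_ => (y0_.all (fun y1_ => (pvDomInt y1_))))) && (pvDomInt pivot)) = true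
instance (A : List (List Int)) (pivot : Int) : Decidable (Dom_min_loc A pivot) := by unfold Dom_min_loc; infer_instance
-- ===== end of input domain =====

-- B replaces A's single pass with a running (loc, min) pair by two plain passes:
-- first compute the minimum absolute value of the nonzero submatrix entries, then
-- rescan recording the last position attaining it (objective: simpler decomposition,
-- same cost; return value only, no argument is mutated).

-- ===== PORT A =====
-- helper 'abs' from the module
def pyabs (x : Int) : Int := if x ≥ 0 then x else -x

-- 'min = float(\'inf\')' is modeled as 'none': the float is only ever compared with
-- integer absolute values ('a <= inf' is always true), which leInf renders exactly.
def leInf (a : Int) (M : Option Int) : Bool :=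
  match M with
  | none => true
  | some mv => a ≤ mv

def min_loc (A : List (List Int)) (pivot : Int) : List Int :=
  let n : Int := A.length
  let m : Int := ((PySem.List.pyGet? A 0).getD []).length   -- len(A[0]); IndexError (A = []) excluded by Pre_
  ((PySem.List.pyRange pivot n 1).foldl (fun st row =>
    (PySem.List.pyRange pivot m 1).foldl (fun st col =>
      -- A[row][col]; out-of-range accesses (IndexError) are excluded by Pre_
      let v := PySem.List.pyGetD ((PySem.List.pyGet? A row).getD []) col 0
      if v ≠ 0 ∧ leInf (pyabs v) st.2 = true then ([row, col], some (pyabs v)) else st) st)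
    (([pivot, pivot], none) : List Int × Option Int)).1

-- ===== PORT B =====
def min_loc_alt (A : List (List Int)) (pivot : Int) : List Int :=
  let n : Int := A.length
  let m : Int := ((PySem.List.pyGet? A 0).getD []).length
  let vals := (PySem.List.pyRange pivot n 1).flatMap (fun r =>
    (PySem.List.pyRange pivot m 1).filterMap (fun c =>
      let v := PySem.List.pyGetD ((PySem.List.pyGet? A r).getD []) c 0
      if v ≠ 0 then some (pyabs v) else none))
  match PySem.List.min? vals (fun x => x) with   -- 'if not vals: …' / 'mn = min(vals)'
  | none => [pivot, pivot]
  | some mn =>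
    (PySem.List.pyRange pivot n 1).foldl (fun loc r =>
      (PySem.List.pyRange pivot m 1).foldl (fun loc c =>
        let v := PySem.List.pyGetD ((PySem.List.pyGet? A r).getD []) c 0
        if v ≠ 0 ∧ pyabs v = mn then [r, c] else loc) loc) [pivot, pivot]

-- ===== PRECONDITION & SPEC =====
-- Pre_ excludes exactly the inputs where the Python raises IndexError: empty A
-- (len(A[0])) or some visited index A[row] / A[row][col] out of range (rows visited
-- whenever pivot < len(A): all of A for negative pivot, A[pivot:] otherwise).
def Pre_min_loc (A : List (List Int)) (pivot : Int) : Prop :=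
  A ≠ [] ∧ (pivot < (A.length : Int) →
    (-(A.length : Int) ≤ pivot ∧
     (pivot < (A.headI.length : Int) →
       ∀ r ∈ (if 0 ≤ pivot then A.drop pivot.toNat else A),
         -(r.length : Int) ≤ pivot ∧ (A.headI.length : Int) ≤ (r.length : Int))))
instance (A : List (List Int)) (pivot : Int) : Decidable (Pre_min_loc A pivot) := by
  unfold Pre_min_loc; infer_instance

def pvWitness_min_loc : List (List Int) × Int := ([[2, -1], [3, 4]], 0)

def Spec_min_loc (A : List (List Int)) (pivot : Int) (out : List Int) : Prop := out = min_loc_alt A pivot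
instance (A : List (List Int)) (pivot : Int) (out : List Int) : Decidable (Spec_min_loc A pivot out) := by unfold Spec_min_loc; infer_instance

-- ===== CLAIM (what is proved, stated in full; the proofs are below) =====
def Claim_equal_min_loc : Prop := ∀ (A : List (List Int)) (pivot : Int), Dom_min_loc A pivot → Pre_min_loc A pivot → Spec_min_loc A pivot (min_loc A pivot)

-- ===== LEMMAS AND PROOFS =====

-- value of A at a position (A[r][c] with the ports' defaults)
def atF (A : List (List Int)) (p : Int × Int) : Int :=
  PySem.List.pyGetD ((PySem.List.pyGet? A p.1).getD []) p.2 0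

-- the nonzero absolute values of the entries at the positions of L, in order
def valsF (F : Int × Int → Int) (L : List (Int × Int)) : List Int :=
  L.filterMap (fun p => if F p ≠ 0 then some (pyabs (F p)) else none)

def omin : Option Int → Int → Option Int
  | none, v => some v
  | some a, v => some (min a v)

def stepA (F : Int × Int → Int) (st : List Int × Option Int) (p : Int × Int) : List Int × Option Int :=
  if F p ≠ 0 ∧ leInf (pyabs (F p)) st.2 = true then ([p.1, p.2], some (pyabs (F p))) else st

def stepB (F : Int × Int → Int) (mn : Int) (l : List Int) (p : Int × Int) : List Int :=
  if F p ≠ 0 ∧ pyabs (F p) = mn then [p.1, p.2] else l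

theorem foldl_nested_eq_flat {σ : Type} (f : σ → Int × Int → σ) (rows cols : List Int) (init : σ) :
    rows.foldl (fun s r => cols.foldl (fun s c => f s (r, c)) s) init
      = (rows.flatMap (fun r => cols.map (fun c => (r, c)))).foldl f init := by
  induction rows generalizing init with
  | nil => rfl
  | cons r rows ih =>
      simp only [List.flatMap_cons, List.foldl_cons, List.foldl_append, List.foldl_map]
      exact ih _

theorem flatMap_filterMap (g : Int × Int → Option Int) (rows cols : List Int) :
    rows.flatMap (fun r => cols.filterMap (fun c => g (r, c)))
      = (rows.flatMap (fun r => cols.map (fun c => (r, c)))).filterMap g := by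
  induction rows with
  | nil => rfl
  | cons r rows ih =>
      simp only [List.flatMap_cons, List.filterMap_append, List.filterMap_map, ih,
        Function.comp_def]

theorem foldl_min_le (t : List Int) (a : Int) : t.foldl min a ≤ a ∧ ∀ y ∈ t, t.foldl min a ≤ y := by
  induction t generalizing a with
  | nil => simp
  | cons v t ih =>
      obtain ⟨h1, h2⟩ := ih (min a v)
      refine ⟨le_trans h1 (min_le_left _ _), ?_⟩
      intro y hy
      rcases List.mem_cons.mp hy with rfl | hy
      · exact le_trans h1 (min_le_right _ _)
      · exact h2 y hy

theorem foldl_min_mem (t : List Int) (a : Int) : t.foldl min a = a ∨ t.foldl min a ∈ t := by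
  induction t generalizing a with
  | nil => simp
  | cons v t ih =>
      simp only [List.foldl_cons]
      rcases ih (min a v) with h | h
      · rw [h]
        rcases le_total a v with hle | hle
        · left; exact min_eq_left hle
        · right; rw [min_eq_right hle]; exact List.mem_cons_self
      · right; exact List.mem_cons_of_mem _ h

theorem ominF_some (vs : List Int) (a : Int) : vs.foldl omin (some a) = some (vs.foldl min a) := by
  induction vs generalizing a with
  | nil => rfl
  | cons v vs ih => simpa [omin] using ih (min a v)

theorem minq_eq_ominF (vs : List Int) :
    PySem.List.min? vs (fun x => x) = vs.foldl omin none := by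
  cases vs with
  | nil =>
      cases hm : PySem.List.min? ([] : List Int) (fun x => x) with
      | none => rfl
      | some m => exact absurd (PySem.List.min?_mem hm) (by simp)
  | cons v t =>
      cases hm : PySem.List.min? (v :: t) (fun x => x) with
      | none =>
          have := PySem.List.min?_eq_none_iff (xs := v :: t) (key := fun x => x)
          simp [hm] at this
      | some m =>
          have hmem : m ∈ v :: t := PySem.List.min?_mem hm
          have hmin : ∀ y ∈ v :: t, m ≤ y := fun y hy => PySem.List.min?_isMin hm y hy
          simp only [List.foldl_cons, omin, ominF_some]
          congr 1
          obtain ⟨hle, hall⟩ := foldl_min_le t v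
          apply le_antisymm
          · rcases foldl_min_mem t v with h | h
            · rw [h]; exact hmin v List.mem_cons_self
            · exact hmin _ (List.mem_cons_of_mem _ h)
          · rcases List.mem_cons.mp hmem with rfl | h
            · exact hle
            · exact hall _ h

theorem stepB_overwrite (F : Int × Int → Int) (mn : Int) (L : List (Int × Int))
    (h : ∃ p ∈ L, F p ≠ 0 ∧ pyabs (F p) = mn) (l1 l2 : List Int) :
    L.foldl (stepB F mn) l1 = L.foldl (stepB F mn) l2 := by
  induction L generalizing l1 l2 with
  | nil => simp at h
  | cons x L ih =>
      obtain ⟨p, hp, hc⟩ := h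
      rcases List.mem_cons.mp hp with rfl | hp
      · simp only [List.foldl_cons, stepB, if_pos hc]
      · simp only [List.foldl_cons]
        exact ih ⟨p, hp, hc⟩ _ _

theorem mainA (F : Int × Int → Int) (L : List (Int × Int)) (loc : List Int) (M : Option Int) :
    L.foldl (stepA F) (loc, M)
      = (((valsF F L).foldl omin M).elim loc (fun mn => L.foldl (stepB F mn) loc),
         (valsF F L).foldl omin M) := by
  induction L generalizing loc M with
  | nil => cases M <;> rfl
  | cons x L ih =>
      by_cases h0 : F x = 0
      · have hv : valsF F (x :: L) = valsF F L := by simp [valsF, h0]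
        have hsA : stepA F (loc, M) x = (loc, M) := by simp [stepA, h0]
        have hsB : ∀ mn l, stepB F mn l x = l := fun mn l => by simp [stepB, h0]
        simp only [List.foldl_cons, hsA, hv, hsB]
        exact ih loc M
      · have hv : valsF F (x :: L) = pyabs (F x) :: valsF F L := by simp [valsF, h0]
        by_cases hle : leInf (pyabs (F x)) M = true
        · -- the update fires: new state ([x.1, x.2], some |F x|)
          have hsA : stepA F (loc, M) x = ([x.1, x.2], some (pyabs (F x))) := by
            simp [stepA, h0, hle]
          have hM : (valsF F (x :: L)).foldl omin M
              = (valsF F L).foldl omin (some (pyabs (F x))) := by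
            rw [hv]
            simp only [List.foldl_cons]
            congr 1
            cases M with
            | none => rfl
            | some a =>
                have ha : pyabs (F x) ≤ a := by simpa [leInf] using hle
                simp [omin, min_eq_right ha]
          simp only [List.foldl_cons, hsA, hM]
          rw [ih]
          rw [ominF_some]
          set b := (valsF F L).foldl min (pyabs (F x)) with hb
          simp only [Option.elim]
          refine Prod.ext ?_ rfl
          simp only
          by_cases heq : b = pyabs (F x)
          · -- x itself attains the final minimum: the first step writes [x.1, x.2]
            have : stepB F b loc x = [x.1, x.2] := by
              rw [stepB, if_pos ⟨h0, heq.symm⟩]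
            rw [this]
          · -- the final minimum also occurs later in L: the fold overwrites any start
            have hbmem : b ∈ valsF F L := by
              rcases foldl_min_mem (valsF F L) (pyabs (F x)) with h | h
              · exact absurd (hb.trans h) heq
              · exact hb ▸ h
            obtain ⟨p, hp, hgp⟩ := List.mem_filterMap.mp hbmem
            have hp' : F p ≠ 0 ∧ pyabs (F p) = b := by
              by_cases hz : F p = 0
              · simp [hz] at hgp
              · rw [if_pos hz] at hgp
                exact ⟨hz, Option.some.inj hgp⟩
            exact stepB_overwrite F b L ⟨p, hp, hp'⟩ _ _
        · -- no update: M = some a with a < |F x|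
            cases M with
            | none => simp [leInf] at hle
            | some a =>
                have ha : ¬ pyabs (F x) ≤ a := by simpa [leInf] using hle
                have hsA : stepA F (loc, some a) x = (loc, some a) := by
                  simp [stepA, h0, leInf, ha]
                have hM : (valsF F (x :: L)).foldl omin (some a)
                    = (valsF F L).foldl omin (some a) := by
                  rw [hv]
                  simp only [List.foldl_cons, omin]
                  rw [min_eq_left (le_of_lt (lt_of_not_ge ha))]
                simp only [List.foldl_cons, hsA, hM]
                rw [ih]
                rw [ominF_some]
                set b := (valsF F L).foldl min a with hb
                simp only [Option.elim]
                refine Prod.ext ?_ rfl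
                simp only
                have hblt : b < pyabs (F x) := by
                  have := (foldl_min_le (valsF F L) a).1
                  omega
                have : stepB F b loc x = loc := by
                  rw [stepB, if_neg]
                  rintro ⟨-, habs⟩
                  omega
                rw [this]

-- A's port, flattened to a single fold over the row-major position list, then
-- characterised by mainA
theorem min_loc_eq (A : List (List Int)) (pivot : Int) :
    min_loc A pivot
      = (((valsF (atF A) ((PySem.List.pyRange pivot (A.length : Int) 1).flatMap
            (fun r => (PySem.List.pyRange pivot (((PySem.List.pyGet? A 0).getD []).length : Int) 1).map
              (fun c => (r, c))))).foldl omin none).elim [pivot, pivot]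
          (fun mn => (((PySem.List.pyRange pivot (A.length : Int) 1).flatMap
            (fun r => (PySem.List.pyRange pivot (((PySem.List.pyGet? A 0).getD []).length : Int) 1).map
              (fun c => (r, c))))).foldl (stepB (atF A) mn) [pivot, pivot])) := by
  have h1 : min_loc A pivot
      = (((PySem.List.pyRange pivot (A.length : Int) 1).flatMap
            (fun r => (PySem.List.pyRange pivot (((PySem.List.pyGet? A 0).getD []).length : Int) 1).map
              (fun c => (r, c)))).foldl (stepA (atF A)) ([pivot, pivot], none)).1 :=
    congrArg Prod.fst (foldl_nested_eq_flat (stepA (atF A))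
      (PySem.List.pyRange pivot (A.length : Int) 1)
      (PySem.List.pyRange pivot (((PySem.List.pyGet? A 0).getD []).length : Int) 1)
      ([pivot, pivot], none))
  rw [h1, mainA]

theorem vals_flat (A : List (List Int)) (rows cols : List Int) :
    rows.flatMap (fun r => cols.filterMap
        (fun c => (fun p => if atF A p ≠ 0 then some (pyabs (atF A p)) else none) (r, c)))
      = valsF (atF A) (rows.flatMap (fun r => cols.map (fun c => (r, c)))) := by
  unfold valsF
  exact flatMap_filterMap (fun p => if atF A p ≠ 0 then some (pyabs (atF A p)) else none) rows cols

-- ===== VERDICT (by name: the statement is the Claim_ definition above) =====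
theorem min_loc_spec : Claim_equal_min_loc := by
  intro A pivot _dom _pre
  unfold Spec_min_loc min_loc_alt
  show min_loc A pivot =
    (match PySem.List.min? ((PySem.List.pyRange pivot (A.length : Int) 1).flatMap
        (fun r => (PySem.List.pyRange pivot (((PySem.List.pyGet? A 0).getD []).length : Int) 1).filterMap
          (fun c => (fun p => if atF A p ≠ 0 then some (pyabs (atF A p)) else none) (r, c)))) (fun x => x) with
     | none => [pivot, pivot]
     | some mn =>
        (PySem.List.pyRange pivot (A.length : Int) 1).foldl (fun loc r =>
          (PySem.List.pyRange pivot (((PySem.List.pyGet? A 0).getD []).length : Int) 1).foldl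
            (fun loc c => stepB (atF A) mn loc (r, c)) loc) [pivot, pivot])
  rw [vals_flat, minq_eq_ominF, min_loc_eq]
  cases hM : (valsF (atF A) ((PySem.List.pyRange pivot (A.length : Int) 1).flatMap
      (fun r => (PySem.List.pyRange pivot (((PySem.List.pyGet? A 0).getD []).length : Int) 1).map
        (fun c => (r, c))))).foldl omin none with
  | none => rfl
  | some mn =>
      simp only [Option.elim]
      exact (foldl_nested_eq_flat (stepB (atF A) mn) _ _ _).symm
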